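-- pv_equiv track=rewrite | github.com/ramcharan-tech/LearnPythonEasy | Dailyproblems/min_cool_drink_loss.py | findMinLoss_iterative
-- ===== SOURCE A (Python) =====
-- def findMinLoss_iterative(N,A):
--     dp = [[0] * N for _ in range(N)]
--     for l in range(0,N): # l represents the subproblem size
--         for i in range(N-l): # i is the left index
--             j = i +l # j is the right index
--             K = N-(j-i)
--             if i == j:
--                 dp[i][j] = K * A[i]
--             else:
--                 dp[i][j] = min(K*A[i]+dp[i+1][j], K*A[j]+dp[i][j-1])
--     return dp[0][N-1]
-- ===== SOURCE B (Python) =====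
-- def findMinLoss_iterative(N, A):
--     # Top-down memoized recursion: solve(i, j) = min weighted loss for the
--     # interval A[i..j] (multiplier K = N-(j-i)), cached in a dict; answer is
--     # solve(0, N-1).  Demand-driven instead of filling a table by length.
--     memo = {}
--
--     def solve(i, j):
--         if (i, j) in memo:
--             return memo[(i, j)]
--         K = N - (j - i)
--         if i == j:
--             v = K * A[i]
--         else:
--             v = min(K * A[i] + solve(i + 1, j), K * A[j] + solve(i, j - 1))
--         memo[(i, j)] = v
--         return v
--
--     return solve(0, N - 1)
-- ===== Notes on version B (the rewrite author's own statement) =====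
-- stated objective: alternative
-- what changed: Replaces A's bottom-up table filled by increasing interval length with a demand-driven top-down recursion solve(i,j) memoized in a dict, entered at solve(0,N-1).
import Mathlib
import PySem

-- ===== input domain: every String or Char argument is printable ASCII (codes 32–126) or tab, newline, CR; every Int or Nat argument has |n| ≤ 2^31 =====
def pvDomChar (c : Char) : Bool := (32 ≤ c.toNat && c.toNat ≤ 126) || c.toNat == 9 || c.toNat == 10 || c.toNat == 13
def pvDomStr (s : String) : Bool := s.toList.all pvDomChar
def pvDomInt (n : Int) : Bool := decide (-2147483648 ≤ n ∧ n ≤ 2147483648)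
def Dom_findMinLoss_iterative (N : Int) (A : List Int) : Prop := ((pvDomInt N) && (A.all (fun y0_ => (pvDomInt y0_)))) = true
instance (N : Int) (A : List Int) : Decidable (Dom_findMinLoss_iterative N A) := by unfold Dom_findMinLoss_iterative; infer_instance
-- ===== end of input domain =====

-- B replaces A's bottom-up length-indexed table with a demand-driven top-down
-- recursion memoized in a dict; same return value on every admitted input.


-- ===== PORT A =====
-- dp = [[0]*N for _ in range(N)]; [0]*N is List.replicate N.toNat 0 ([] for N ≤ 0, as in Python)
def findMinLoss_iterative (N : Int) (A : List Int) : Int :=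
  let dp : List (List Int) :=
    (PySem.List.pyRange 0 N 1).map (fun _ => List.replicate N.toNat (0 : Int))
  let dp := (PySem.List.pyRange 0 N 1).foldl (fun dp l =>
    (PySem.List.pyRange 0 (N - l) 1).foldl (fun dp i =>
      let j := i + l
      let K := N - (j - i)
      if i = j then
        PySem.List.pySetD dp i
          (PySem.List.pySetD (PySem.List.pyGetD dp i []) j (K * PySem.List.pyGetD A i 0))
      else
        PySem.List.pySetD dp i
          (PySem.List.pySetD (PySem.List.pyGetD dp i []) j
            (min (K * PySem.List.pyGetD A i 0 +
                    PySem.List.pyGetD (PySem.List.pyGetD dp (i + 1) []) j 0)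
                 (K * PySem.List.pyGetD A j 0 +
                    PySem.List.pyGetD (PySem.List.pyGetD dp i []) (j - 1) 0)))) dp) dp
  PySem.List.pyGetD (PySem.List.pyGetD dp 0 []) (N - 1) 0

-- ===== PORT B =====
-- solve(i, j) memoized in a dict; recursion structurally on gap = (j - i).toNat
-- (Python's call stack); the gap-0-with-i≠j branch is unreachable from the entry call.
def pvSolve (N : Int) (A : List Int) : Nat → Int → Int → PySem.Dict (Int × Int) Int → Int × PySem.Dict (Int × Int) Int
  | gap, i, j, memo =>
    match memo.get? (i, j) with
    | some v => (v, memo)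
    | none =>
      let K := N - (j - i)
      if i = j then
        let v := K * PySem.List.pyGetD A i 0
        (v, memo.insert (i, j) v)
      else
        match gap with
        | 0 => (0, memo)  -- unreachable: callers keep gap = j - i ≥ 1 whenever i ≠ j
        | g + 1 =>
          let p1 := pvSolve N A g (i + 1) j memo
          let p2 := pvSolve N A g i (j - 1) p1.2
          let v := min (K * PySem.List.pyGetD A i 0 + p1.1)
                       (K * PySem.List.pyGetD A j 0 + p2.1)
          (v, p2.2.insert (i, j) v)

def findMinLoss_iterative_alt (N : Int) (A : List Int) : Int :=
  (pvSolve N A (N - 1).toNat 0 (N - 1) PySem.Dict.empty).1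

-- ===== PRECONDITION & SPEC =====
-- Outside 1 ≤ N ≤ len(A) both Pythons raise IndexError (empty dp row / A index out of range).
def Pre_findMinLoss_iterative (N : Int) (A : List Int) : Prop := 1 ≤ N ∧ N ≤ A.length
instance (N : Int) (A : List Int) : Decidable (Pre_findMinLoss_iterative N A) := by
  unfold Pre_findMinLoss_iterative; infer_instance
def pvWitness_findMinLoss_iterative : Int × List Int := (2, [3, 1])

def Spec_findMinLoss_iterative (N : Int) (A : List Int) (out : Int) : Prop := out = findMinLoss_iterative_alt N A
instance (N : Int) (A : List Int) (out : Int) : Decidable (Spec_findMinLoss_iterative N A out) := by unfold Spec_findMinLoss_iterative; infer_instance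

-- ===== CLAIM (what is proved, stated in full; the proofs are below) =====
def Claim_equal_findMinLoss_iterative : Prop := ∀ (N : Int) (A : List Int), Dom_findMinLoss_iterative N A → Pre_findMinLoss_iterative N A → Spec_findMinLoss_iterative N A (findMinLoss_iterative N A)

-- ===== LEMMAS AND PROOFS =====

-- The common recurrence: pvG N A l i = optimal loss for the interval A[i..i+l], multiplier N - l.
def pvG (N : Int) (A : List Int) : Nat → Nat → Int
  | 0, i => N * A.getD i 0
  | l + 1, i =>
      min ((N - (l + 1 : Nat)) * A.getD i 0 + pvG N A l (i + 1))
          ((N - (l + 1 : Nat)) * A.getD (i + l + 1) 0 + pvG N A l i)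

-- B-side: every memo entry already stores its pvG value
def pvGood (N : Int) (A : List Int) (memo : PySem.Dict (Int × Int) Int) : Prop :=
  ∀ (a b : Int) (v : Int), memo.get? (a, b) = some v →
    0 ≤ a ∧ a ≤ b ∧ v = pvG N A (b - a).toNat a.toNat

lemma pvSolve_correct (N : Int) (A : List Int) :
    ∀ (g : Nat) (i j : Int) (memo : PySem.Dict (Int × Int) Int),
      pvGood N A memo → 0 ≤ i → i ≤ j → (j - i).toNat = g →
      (pvSolve N A g i j memo).1 = pvG N A g i.toNat ∧
      pvGood N A (pvSolve N A g i j memo).2 := by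
  intro g
  induction g with
  | zero =>
      intro i j memo hgood hi hij hg
      have hji : j = i := by omega
      subst hji
      rw [pvSolve]
      cases hv : memo.get? (j, j) with
      | some v =>
          obtain ⟨_, _, hveq⟩ := hgood j j v hv
          refine ⟨?_, hgood⟩
          simpa using hveq
      | none =>
          dsimp only
          rw [if_pos rfl]
          have hcast : j = ((j.toNat : Nat) : Int) := by omega
          have hget : PySem.List.pyGetD A j 0 = A.getD j.toNat 0 := by
            conv_lhs => rw [hcast]
            rw [PySem.List.pyGetD_natCast]
          constructor
          · show (N - (j - j)) * PySem.List.pyGetD A j 0 = pvG N A 0 j.toNat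
            rw [pvG, hget]
            ring_nf
          · intro a b v hv'
            rw [PySem.Dict.get?_insert] at hv'
            by_cases hk : (a, b) = (j, j)
            · have ha : a = j := by simpa using congrArg Prod.fst hk
              have hb : b = j := by simpa using congrArg Prod.snd hk
              rw [if_pos hk] at hv'
              injection hv' with h
              refine ⟨by omega, by omega, ?_⟩
              rw [ha, hb, ← h, show (j - j).toNat = 0 from by omega, pvG, hget]
              ring_nf
            · rw [if_neg hk] at hv'
              exact hgood a b v hv'
  | succ g ih =>
      intro i j memo hgood hi hij hg
      have hne : ¬ i = j := by omega
      rw [pvSolve]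
      cases hv : memo.get? (i, j) with
      | some v =>
          obtain ⟨_, _, hveq⟩ := hgood i j v hv
          rw [hg] at hveq
          exact ⟨hveq, hgood⟩
      | none =>
          dsimp only
          rw [if_neg hne]
          obtain ⟨h1v, h1g⟩ := ih (i + 1) j memo hgood (by omega) (by omega) (by omega)
          obtain ⟨h2v, h2g⟩ := ih i (j - 1) _ h1g hi (by omega) (by omega)
          have hji : j - i = ((g + 1 : Nat) : Int) := by omega
          have hiN : (i + 1).toNat = i.toNat + 1 := by omega
          have hic : i = ((i.toNat : Nat) : Int) := by omega
          have hjc : j = ((i.toNat + g + 1 : Nat) : Int) := by omega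
          have hgi : PySem.List.pyGetD A i 0 = A.getD i.toNat 0 := by
            conv_lhs => rw [hic]
            rw [PySem.List.pyGetD_natCast]
          have hgj : PySem.List.pyGetD A j 0 = A.getD (i.toNat + g + 1) 0 := by
            conv_lhs => rw [hjc]
            rw [PySem.List.pyGetD_natCast]
          have hval : min ((N - (j - i)) * PySem.List.pyGetD A i 0 + (pvSolve N A g (i + 1) j memo).1)
              ((N - (j - i)) * PySem.List.pyGetD A j 0 + (pvSolve N A g i (j - 1) (pvSolve N A g (i + 1) j memo).2).1)
              = pvG N A (g + 1) i.toNat := by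
            rw [h1v, h2v, hiN, pvG, hji, hgi, hgj]
          refine ⟨hval, ?_⟩
          intro a b v hv'
          rw [PySem.Dict.get?_insert] at hv'
          by_cases hk : (a, b) = (i, j)
          · have ha : a = i := by simpa using congrArg Prod.fst hk
            have hb : b = j := by simpa using congrArg Prod.snd hk
            rw [if_pos hk] at hv'
            injection hv' with h
            refine ⟨by omega, by omega, ?_⟩
            rw [ha, hb, ← h, show (j - i).toNat = g + 1 from by omega]
            exact hval
          · rw [if_neg hk] at hv'
            exact h2g a b v hv'

lemma pvB_result (N : Int) (A : List Int) (n : Nat) (hN : N = (n : Int)) (hn : 1 ≤ n) :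
    findMinLoss_iterative_alt N A = pvG N A (n - 1) 0 := by
  unfold findMinLoss_iterative_alt
  have hgood : pvGood N A PySem.Dict.empty := by
    intro a b v hv
    rw [PySem.Dict.get?_empty] at hv
    cases hv
  have hg : ((N - 1) - 0).toNat = (N - 1).toNat := by omega
  obtain ⟨hval, -⟩ := pvSolve_correct N A (N - 1).toNat 0 (N - 1) PySem.Dict.empty hgood
    (le_refl 0) (by omega) hg
  rw [hval]
  congr 1
  omega

-- A-side: table invariant (unchanged from the straightforward reading of A)
def pvRd (dp : List (List Int)) (i j : Nat) : Int := (dp.getD i []).getD j 0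

lemma pv_foldl_pyRange_zero_nat {α : Type} (f : α → Int → α) (m : Nat) (init : α) :
    (PySem.List.pyRange 0 (m : Int) 1).foldl f init
      = (List.range m).foldl (fun a (k : Nat) => f a (k : Int)) init := by
  rw [PySem.List.pyRange_zero_nat]
  exact List.foldl_map

lemma pv_getD_set_row (dp : List (List Int)) (i a : Nat) (x : List Int) (hi : i < dp.length) :
    (dp.set i x).getD a [] = if a = i then x else dp.getD a [] := by
  simp only [List.getD_eq_getElem?_getD, List.getElem?_set]
  rcases eq_or_ne a i with rfl | h
  · simp [hi]
  · simp [h, Ne.symm h]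

lemma pv_shape_rows {n : Nat} (dp : List (List Int))
    (h : ∀ r ∈ dp, r.length = n) (i : Nat) (hi : i < dp.length) :
    (dp.getD i []).length = n := by
  have := h (dp[i]) (List.getElem_mem hi)
  simpa [List.getD_eq_getElem?_getD, List.getElem?_eq_getElem hi] using this

def pvSt (dp : List (List Int)) (i j : Nat) (v : Int) : List (List Int) :=
  dp.set i ((dp.getD i []).set j v)

def pvShape (n : Nat) (dp : List (List Int)) : Prop :=
  dp.length = n ∧ ∀ r ∈ dp, r.length = n

def pvInv (N : Int) (A : List Int) (n t s : Nat) (dp : List (List Int)) : Prop :=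
  pvShape n dp ∧ ∀ i j : Nat, i ≤ j → j < n → (j - i < t ∨ (j - i = t ∧ i < s)) →
    pvRd dp i j = pvG N A (j - i) i

lemma pv_shape_st {n : Nat} (dp : List (List Int)) (i j : Nat) (v : Int)
    (h : pvShape n dp) (hi : i < n) : pvShape n (pvSt dp i j v) := by
  obtain ⟨hlen, hrows⟩ := h
  refine ⟨by simp [pvSt, hlen], ?_⟩
  intro r hr
  rcases List.mem_or_eq_of_mem_set hr with h' | h'
  · exact hrows r h'
  · subst h'
    rw [List.length_set]
    exact pv_shape_rows dp hrows i (by omega)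

lemma pv_rd_st {n : Nat} (dp : List (List Int)) (i j a b : Nat) (v : Int)
    (h : pvShape n dp) (hi : i < n) (hj : j < n) :
    pvRd (pvSt dp i j v) a b = if a = i ∧ b = j then v else pvRd dp a b := by
  obtain ⟨hlen, hrows⟩ := h
  have hrow := pv_shape_rows dp hrows i (by omega)
  unfold pvRd pvSt
  rw [pv_getD_set_row dp i a _ (by omega)]
  by_cases hai : a = i
  · by_cases hbj : b = j
    · rw [hai, hbj, if_pos rfl, if_pos ⟨rfl, rfl⟩]
      have hlt : j < ((dp.getD i []).set j v).length := by
        rw [List.length_set]; omega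
      rw [List.getD_eq_getElem?_getD, List.getElem?_eq_getElem hlt]
      simp
    · rw [hai, if_pos rfl, if_neg (by simp [hbj])]
      simp [List.getD_eq_getElem?_getD, Ne.symm hbj]
  · simp [hai]

lemma pv_inner_step (N : Int) (A : List Int) (n t s : Nat) (ht : t < n) (hs : s < n - t) (dp : List (List Int)) (hinv : pvInv N A n t s dp) :
    pvInv N A n t (s + 1)
      (if ((s : Int)) = (s : Int) + (t : Int) then
        PySem.List.pySetD dp (s : Int)
          (PySem.List.pySetD (PySem.List.pyGetD dp (s : Int) []) ((s : Int) + (t : Int))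
            ((N - (((s : Int) + (t : Int)) - (s : Int))) * PySem.List.pyGetD A (s : Int) 0))
      else
        PySem.List.pySetD dp (s : Int)
          (PySem.List.pySetD (PySem.List.pyGetD dp (s : Int) []) ((s : Int) + (t : Int))
            (min ((N - (((s : Int) + (t : Int)) - (s : Int))) * PySem.List.pyGetD A (s : Int) 0 +
                    PySem.List.pyGetD (PySem.List.pyGetD dp ((s : Int) + 1) []) ((s : Int) + (t : Int)) 0)
                 ((N - (((s : Int) + (t : Int)) - (s : Int))) * PySem.List.pyGetD A ((s : Int) + (t : Int)) 0 +
                    PySem.List.pyGetD (PySem.List.pyGetD dp (s : Int) []) (((s : Int) + (t : Int)) - 1) 0)))) := by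
  obtain ⟨hshape, hdiag⟩ := hinv
  by_cases h0 : t = 0
  · subst h0
    rw [if_pos (by simp)]
    simp only [Nat.cast_zero, add_zero, sub_self, sub_zero,
      PySem.List.pyGetD_natCast, PySem.List.pySetD_natCast]
    constructor
    · exact pv_shape_st _ _ _ _ hshape (by omega)
    · intro i j hij hj hcase
      rw [show dp.set s ((dp.getD s []).set s (N * A.getD s 0))
            = pvSt dp s s (N * A.getD s 0) from rfl,
          pv_rd_st dp s s i j _ hshape (by omega) (by omega)]
      by_cases hcur : i = s ∧ j = s
      · obtain ⟨rfl, rfl⟩ := hcur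
        simp [pvG]
      · rw [if_neg hcur]
        apply hdiag i j hij hj
        rcases hcase with h | ⟨h1, h2⟩
        · exact Or.inl h
        · right
          refine ⟨h1, ?_⟩
          by_contra hcon
          exact hcur ⟨by omega, by omega⟩
  · have ht1 : 1 ≤ t := by omega
    rw [if_neg (by omega)]
    have hst : (s : Int) + (t : Int) = ((s + t : Nat) : Int) := by push_cast; ring
    have hs1 : (s : Int) + 1 = ((s + 1 : Nat) : Int) := by push_cast; ring
    simp only [hst, hs1]
    have hK : N - (((s + t : Nat) : Int) - (s : Int)) = N - ((t : Nat) : Int) := by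
      push_cast; ring
    have hm1 : ((s + t : Nat) : Int) - 1 = ((s + t - 1 : Nat) : Int) := by omega
    simp only [hK, hm1, PySem.List.pyGetD_natCast, PySem.List.pySetD_natCast]
    have hr1 : (dp.getD (s + 1) []).getD (s + t) 0 = pvG N A (t - 1) (s + 1) := by
      have := hdiag (s + 1) (s + t) (by omega) (by omega) (Or.inl (by omega))
      simpa [pvRd, show s + t - (s + 1) = t - 1 from by omega] using this
    have hr2 : (dp.getD s []).getD (s + t - 1) 0 = pvG N A (t - 1) s := by
      have := hdiag s (s + t - 1) (by omega) (by omega) (Or.inl (by omega))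
      simpa [pvRd, show s + t - 1 - s = t - 1 from by omega] using this
    have hval : min ((N - ((t : Nat) : Int)) * A.getD s 0 + (dp.getD (s + 1) []).getD (s + t) 0)
        ((N - ((t : Nat) : Int)) * A.getD (s + t) 0 + (dp.getD s []).getD (s + t - 1) 0)
        = pvG N A t s := by
      rw [hr1, hr2]
      rw [show t = (t - 1) + 1 from by omega, pvG]
      rw [show ((t - 1 + 1 : Nat) : Int) = ((t : Nat) : Int) from by omega,
          show s + (t - 1) + 1 = s + t from by omega,
          show t - 1 + 1 = t from by omega]
    constructor
    · exact pv_shape_st _ _ _ _ hshape (by omega)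
    · intro i j hij hj hcase
      rw [show dp.set s ((dp.getD s []).set (s + t) _) = pvSt dp s (s + t) _ from rfl,
          pv_rd_st dp s (s + t) i j _ hshape (by omega) (by omega)]
      by_cases hcur : i = s ∧ j = s + t
      · rw [if_pos hcur]
        rw [hcur.1, hcur.2, show s + t - s = t from by omega]
        exact hval
      · rw [if_neg hcur]
        apply hdiag i j hij hj
        rcases hcase with h | ⟨h1, h2⟩
        · exact Or.inl h
        · right
          refine ⟨h1, ?_⟩
          by_contra hcon
          exact hcur ⟨by omega, by omega⟩

lemma pv_inner_fold (N : Int) (A : List Int) (n t : Nat) (ht : t < n)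
    (dp : List (List Int)) (hinv : pvInv N A n t 0 dp) :
    ∀ s ≤ n - t, pvInv N A n t s
      ((List.range s).foldl (fun dp (k : Nat) =>
        (fun dp (i : Int) =>
          let j := i + (t : Int)
          let K := N - (j - i)
          if i = j then
            PySem.List.pySetD dp i
              (PySem.List.pySetD (PySem.List.pyGetD dp i []) j (K * PySem.List.pyGetD A i 0))
          else
            PySem.List.pySetD dp i
              (PySem.List.pySetD (PySem.List.pyGetD dp i []) j
                (min (K * PySem.List.pyGetD A i 0 +
                        PySem.List.pyGetD (PySem.List.pyGetD dp (i + 1) []) j 0)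
                     (K * PySem.List.pyGetD A j 0 +
                        PySem.List.pyGetD (PySem.List.pyGetD dp i []) (j - 1) 0)))) dp (k : Int)) dp) := by
  intro s
  induction s with
  | zero => intro _; simpa using hinv
  | succ s ih =>
      intro hle
      rw [List.range_succ, List.foldl_append, List.foldl_cons, List.foldl_nil]
      exact pv_inner_step N A n t s ht (by omega) _ (ih (by omega))

lemma pv_inv_shift (N : Int) (A : List Int) (n t : Nat) (dp : List (List Int))
    (h : pvInv N A n t (n - t) dp) (ht : t < n) : pvInv N A n (t + 1) 0 dp := by
  obtain ⟨hs, hd⟩ := h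
  refine ⟨hs, ?_⟩
  intro i j hij hj hcase
  apply hd i j hij hj
  rcases hcase with h | ⟨_, h⟩
  · by_cases h' : j - i < t
    · exact Or.inl h'
    · exact Or.inr ⟨by omega, by omega⟩
  · omega

lemma pv_outer_fold (N : Int) (A : List Int) (n : Nat)
    (hN : N = (n : Int)) :
    ∀ t ≤ n, pvInv N A n t 0
      ((List.range t).foldl (fun dp (k : Nat) =>
        (fun dp (l : Int) =>
          (PySem.List.pyRange 0 (N - l) 1).foldl (fun dp i =>
            let j := i + l
            let K := N - (j - i)
            if i = j then
              PySem.List.pySetD dp i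
                (PySem.List.pySetD (PySem.List.pyGetD dp i []) j (K * PySem.List.pyGetD A i 0))
            else
              PySem.List.pySetD dp i
                (PySem.List.pySetD (PySem.List.pyGetD dp i []) j
                  (min (K * PySem.List.pyGetD A i 0 +
                          PySem.List.pyGetD (PySem.List.pyGetD dp (i + 1) []) j 0)
                       (K * PySem.List.pyGetD A j 0 +
                          PySem.List.pyGetD (PySem.List.pyGetD dp i []) (j - 1) 0)))) dp) dp (k : Int))
        ((PySem.List.pyRange 0 N 1).map (fun _ => List.replicate N.toNat (0 : Int)))) := by
  intro t
  induction t with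
  | zero =>
      intro _
      refine ⟨⟨?_, ?_⟩, ?_⟩
      · simp [PySem.List.length_pyRange_one, hN]
      · intro r hr
        rcases List.mem_map.mp hr with ⟨_, _, rfl⟩
        simp [hN]
      · intro i j _ _ hcase
        rcases hcase with h | ⟨_, h⟩ <;> omega
  | succ t ih =>
      intro hle
      rw [List.range_succ, List.foldl_append, List.foldl_cons, List.foldl_nil]
      beta_reduce
      have hNt : N - ((t : Nat) : Int) = ((n - t : Nat) : Int) := by omega
      rw [hNt, pv_foldl_pyRange_zero_nat]
      exact pv_inv_shift N A n t _
        (pv_inner_fold N A n t (by omega) _ (ih (by omega)) (n - t) (le_refl _))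
        (by omega)

lemma pvA_result (N : Int) (A : List Int) (n : Nat)
    (hN : N = (n : Int)) (hn : 1 ≤ n) :
    findMinLoss_iterative N A = pvG N A (n - 1) 0 := by
  subst hN
  unfold findMinLoss_iterative
  dsimp only
  rw [pv_foldl_pyRange_zero_nat]
  obtain ⟨-, hd⟩ := pv_outer_fold ((n : Nat) : Int) A n rfl n (le_refl n)
  have hread := hd 0 (n - 1) (by omega) (by omega) (Or.inl (by omega))
  have h1 : ((n : Nat) : Int) - 1 = ((n - 1 : Nat) : Int) := by omega
  rw [h1, PySem.List.pyGetD_zero, PySem.List.pyGetD_natCast]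
  simpa [pvRd] using hread

-- ===== VERDICT (by name: the statement is the Claim_ definition above) =====
theorem findMinLoss_iterative_spec : Claim_equal_findMinLoss_iterative := by
  intro N A _ hPre
  obtain ⟨h1, h2⟩ := hPre
  have hN : N = (N.toNat : Int) := by omega
  unfold Spec_findMinLoss_iterative
  rw [pvA_result N A N.toNat hN (by omega),
      pvB_result N A N.toNat hN (by omega)]
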